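-- pv_equiv track=rewrite | github.com/cyanjz/Coding_practice | Samsung_baekjoon/Samsung2/.ipynb_checkpoints/Samsung2-checkpoint.py | squeeze_line
-- ===== SOURCE A (Python) =====
-- order_dict = {i : f'{i}' for i in range(10)}
--
-- r_order_dict = {v : k for k, v in order_dict.items()}
--
-- def squeeze_line(line, N):
--     nums = []
--     num = 0
--     num_init = 1
--     for c in line:
--         if c != '0':
--             if num == c:
--                 num = f'{order_dict[int(r_order_dict[num]) + 1]}'
--                 nums.pop(-1)
--                 nums.append(num)
--                 num = 0
--             else:
--                 nums.append(c)
--                 num = c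
--     if nums:
--         max_num = max([int(r_order_dict[x]) for x in nums])
--     else:
--         max_num = 0
--     t = len(nums)
--     new_line =  ''.join(nums) + '0' * (N-t)
--     return (new_line, max_num)
-- ===== SOURCE B (Python) =====
-- from itertools import groupby
--
-- def squeeze_line(line, N):
--     # Drop the '0's, then merge each maximal run of a digit d of length k
--     # pairwise (non-cascading): k//2 copies of str(d+1) followed by k%2 copies of d.
--     nums = []
--     for d, grp in groupby(c for c in line if c != '0'):
--         k = len(list(grp))
--         nums += [str(int(d) + 1)] * (k // 2) + [d] * (k % 2)
--     max_num = max((int(x) for x in nums), default=0)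
--     return (''.join(nums) + '0' * (N - len(nums)), max_num)
-- ===== Notes on version B (the rewrite author's own statement) =====
-- stated objective: simpler
-- what changed: Replaces the stateful char-by-char fold (last-appended tracker, pop/re-append on merge, two dict lookups per merge) by: drop the '0's, group the rest into maximal runs, and emit k//2 merged digits plus k%2 originals per run; max taken with a default instead of a branch.
import Mathlib
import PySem

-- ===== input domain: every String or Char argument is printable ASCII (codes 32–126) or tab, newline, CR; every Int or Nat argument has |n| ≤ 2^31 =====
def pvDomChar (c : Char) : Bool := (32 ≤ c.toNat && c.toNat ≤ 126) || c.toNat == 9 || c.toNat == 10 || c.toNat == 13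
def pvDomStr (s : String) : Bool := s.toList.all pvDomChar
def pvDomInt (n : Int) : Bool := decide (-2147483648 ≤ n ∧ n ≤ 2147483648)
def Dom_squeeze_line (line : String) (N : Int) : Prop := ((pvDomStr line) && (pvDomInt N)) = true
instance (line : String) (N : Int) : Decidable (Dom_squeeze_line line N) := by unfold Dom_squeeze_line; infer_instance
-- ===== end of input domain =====

-- B replaces A's stateful char-by-char merge fold by run-grouping of the '0'-stripped
-- line (k//2 merged digits + k%2 originals per run): simpler, same cost.


-- ===== PORT A =====
-- order_dict = {i : f'{i}' for i in range(10)}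
def pyOrderDict : PySem.Dict Int String :=
  PySem.Dict.ofList ((PySem.List.pyRange 0 10 1).map (fun i => (i, PySem.Int.toStr i)))

-- r_order_dict = {v : k for k, v in order_dict.items()}
def pyROrderDict : PySem.Dict String Int :=
  PySem.Dict.ofList (pyOrderDict.items.map (fun kv => (kv.2, kv.1)))

-- the merged value  f'{order_dict[int(r_order_dict[num]) + 1]}'  (num is the one-char
-- string equal to c in the merge branch; int(int) is the identity; dict lookups via
-- getD — inside Pre_ the keys are always present, the KeyError inputs are excluded)
def pvMergedA (c : Char) : String :=
  pyOrderDict.getD ((pyROrderDict.getD (String.mk [c]) 0) + 1) ""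

-- loop body of A's `for c in line`; state = (nums, num), num = none encodes the int 0
-- (Python's `num == c` is False whenever num is the int 0).
def pvAStep (st : List String × Option Char) (c : Char) : List String × Option Char :=
  if c ≠ '0' then
    if st.2 == some c then
      -- nums.pop(-1); nums.append(merged); num = 0  (nums is nonempty whenever this
      -- branch is reachable from the initial state, since num was just appended)
      (st.1.dropLast ++ [pvMergedA c], none)
    else
      (st.1 ++ [String.mk [c]], some c)
  else st

def squeeze_line (line : String) (N : Int) : String × Int :=
  let st := line.toList.foldl pvAStep ([], none)
  let nums := st.1
  let max_num : Int :=
    if nums ≠ [] then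
      (PySem.List.max? (nums.map (fun x => pyROrderDict.getD x 0)) (fun y => y)).getD 0
    else 0
  let t : Int := nums.length
  (PySem.Str.join "" nums ++ String.mk (PySem.List.pyRepeat ['0'] (N - t)), max_num)

-- ===== PORT B =====
-- itertools.groupby over the '0'-filtered characters: maximal runs, left to right
def pvGroupRuns : List Char → List (Char × Nat)
  | [] => []
  | c :: cs =>
      (c, 1 + (cs.takeWhile (· == c)).length) :: pvGroupRuns (cs.dropWhile (· == c))
  termination_by l => l.length
  decreasing_by
    exact Nat.lt_succ_of_le (List.Sublist.length_le (List.dropWhile_sublist _))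

-- [str(int(d) + 1)] * (k // 2) + [d] * (k % 2)   (int via ofStr?; always parses inside Pre_)
def pvPiece (d : Char) (k : Nat) : List String :=
  List.replicate (k / 2) (PySem.Int.toStr ((PySem.Int.ofStr? (String.mk [d])).getD 0 + 1)) ++
  List.replicate (k % 2) (String.mk [d])

def pvBNums (l : List Char) : List String :=
  (pvGroupRuns l).flatMap (fun r => pvPiece r.1 r.2)

def squeeze_line_alt (line : String) (N : Int) : String × Int :=
  let nums := pvBNums (line.toList.filter (fun c => c ≠ '0'))
  let max_num : Int :=
    (PySem.List.max? (nums.map (fun x => (PySem.Int.ofStr? x).getD 0)) (fun y => y)).getD 0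
  (PySem.Str.join "" nums ++ String.mk (PySem.List.pyRepeat ['0'] (N - (nums.length : Int))),
   max_num)

-- ===== PRECONDITION & SPEC =====
def pvDigits : List Char := ['0', '1', '2', '3', '4', '5', '6', '7', '8', '9']

-- no two adjacent '9's
def pvNo99 : List Char → Bool
  | a :: b :: t => (!(a == '9' && b == '9')) && pvNo99 (b :: t)
  | _ => true

-- A raises KeyError on any non-digit character other than '0' (r_order_dict lookup) and
-- whenever two '9's merge (order_dict[10]); Pre_ excludes exactly those inputs.
def Pre_squeeze_line (line : String) (N : Int) : Prop :=
  line.toList.all (fun c => pvDigits.contains c) = true ∧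
  pvNo99 (line.toList.filter (fun c => c ≠ '0')) = true

instance (line : String) (N : Int) : Decidable (Pre_squeeze_line line N) := by
  unfold Pre_squeeze_line; infer_instance

def pvWitness_squeeze_line : String × Int := ("1123", 5)

def Spec_squeeze_line (line : String) (N : Int) (out : String × Int) : Prop :=
  out = squeeze_line_alt line N
instance (line : String) (N : Int) (out : String × Int) : Decidable (Spec_squeeze_line line N out) := by unfold Spec_squeeze_line; infer_instance

-- ===== CLAIM (what is proved, stated in full; the proofs are below) =====
def Claim_equal_squeeze_line : Prop := ∀ (line : String) (N : Int), Dom_squeeze_line line N → Pre_squeeze_line line N → Spec_squeeze_line line N (squeeze_line line N)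

-- ===== LEMMAS AND PROOFS =====

theorem pv_step_zero (st : List String × Option Char) : pvAStep st '0' = st := by
  simp [pvAStep]

theorem pv_foldl_filter (l : List Char) (st : List String × Option Char) :
    l.foldl pvAStep st = (l.filter (fun c => c ≠ '0')).foldl pvAStep st := by
  induction l generalizing st with
  | nil => rfl
  | cons c cs ih =>
      by_cases h : c = '0'
      · subst h; simpa [pv_step_zero] using ih st
      · simp [h, ih]

theorem pv_step_append (acc : List String) (s : Option Char) (c : Char)
    (h0 : c ≠ '0') (hs : s ≠ some c) :
    pvAStep (acc, s) c = (acc ++ [String.mk [c]], some c) := by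
  simp [pvAStep, h0]
  intro h; exact absurd (by simpa using h) hs

theorem pv_step_merge (acc : List String) (c : Char) (h0 : c ≠ '0') :
    pvAStep (acc, some c) c = (acc.dropLast ++ [pvMergedA c], none) := by
  simp [pvAStep, h0]

-- a full 2*m block of equal digits: m merges
theorem pv_pairs (m : Nat) (d : Char) (acc : List String) (h0 : d ≠ '0') :
    (List.replicate (2 * m) d).foldl pvAStep (acc, none) =
      (acc ++ List.replicate m (pvMergedA d), none) := by
  induction m generalizing acc with
  | zero => simp
  | succ m ih =>
      have h2 : 2 * (m + 1) = (2 * m) + 1 + 1 := by ring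
      rw [h2, List.replicate_succ, List.replicate_succ, List.foldl_cons, List.foldl_cons,
        pv_step_append acc none d h0 (by simp), pv_step_merge _ d h0,
        List.dropLast_concat, ih (acc ++ [pvMergedA d])]
      simp [List.replicate_succ]

-- A's pieces (with A's merged value)
def pvPieceA (d : Char) (k : Nat) : List String :=
  List.replicate (k / 2) (pvMergedA d) ++ List.replicate (k % 2) (String.mk [d])

theorem pv_run (k : Nat) (d : Char) (acc : List String) (h0 : d ≠ '0') :
    (List.replicate k d).foldl pvAStep (acc, none) =
      (acc ++ pvPieceA d k, if k % 2 = 1 then some d else none) := by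
  obtain ⟨m, o, ho, rfl⟩ : ∃ m o, o < 2 ∧ k = 2 * m + o :=
    ⟨k / 2, k % 2, Nat.mod_lt _ (by norm_num), (Nat.div_add_mod k 2).symm⟩
  interval_cases o
  · have := pv_pairs m d acc h0
    simp [pvPieceA, this]
  · have hrep : List.replicate (2 * m + 1) d = List.replicate (2 * m) d ++ [d] := by
      simp [List.replicate_succ']
    rw [hrep, List.foldl_append, pv_pairs m d acc h0]
    have hmod : (2 * m + 1) % 2 = 1 := by omega
    have hdiv : (2 * m + 1) / 2 = m := by omega
    simp [pv_step_append _ none d h0 (by simp), pvPieceA, hmod, hdiv]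

-- run decomposition of a nonempty list
theorem pv_decomp (c : Char) (cs : List Char) :
    c :: cs =
      List.replicate (1 + (cs.takeWhile (· == c)).length) c ++ cs.dropWhile (· == c) := by
  have htw : cs.takeWhile (· == c) = List.replicate (cs.takeWhile (· == c)).length c :=
    List.eq_replicate_of_mem (fun x hx => by simpa using List.mem_takeWhile_imp hx)
  conv_lhs => rw [← List.takeWhile_append_dropWhile (p := (· == c)) (l := cs)]
  rw [Nat.add_comm 1 _, List.replicate_succ, List.cons_append]
  conv_lhs => rw [htw]

theorem pv_state_irrel (s : Option Char) (acc : List String) (c : Char) (t : List Char)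
    (h0 : c ≠ '0') (hs : s ≠ some c) :
    (c :: t).foldl pvAStep (acc, s) = (c :: t).foldl pvAStep (acc, none) := by
  rw [List.foldl_cons, List.foldl_cons, pv_step_append acc s c h0 hs,
    pv_step_append acc none c h0 (by simp)]

theorem pv_no99_tail (a : Char) (l : List Char) (h : pvNo99 (a :: l) = true) :
    pvNo99 l = true := by
  cases l with
  | nil => rfl
  | cons b t => simp [pvNo99] at h; exact h.2

theorem pv_no99_dropWhile (p : Char → Bool) (l : List Char) (h : pvNo99 l = true) :
    pvNo99 (l.dropWhile p) = true := by
  induction l with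
  | nil => simpa using h
  | cons c cs ih =>
      rw [List.dropWhile_cons]
      by_cases hp : p c = true
      · simp [hp]; exact ih (pv_no99_tail c cs h)
      · simp [hp]; exact h

theorem pv_head_dropWhile (p : Char → Bool) (l : List Char) (x : Char)
    (h : (l.dropWhile p).head? = some x) : p x = false := by
  induction l with
  | nil => simp at h
  | cons c cs ih =>
      rw [List.dropWhile_cons] at h
      by_cases hp : p c = true
      · simp [hp] at h; exact ih h
      · simp [hp] at h; subst h; simpa using hp

theorem pv_bNums_cons (c : Char) (cs : List Char) :
    pvBNums (c :: cs) =
      pvPiece c (1 + (cs.takeWhile (· == c)).length) ++ pvBNums (cs.dropWhile (· == c)) := by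
  rw [pvBNums, pvGroupRuns, List.flatMap_cons]; rfl

theorem pv_mergedA_eq (d : Char)
    (hd : d ∈ (['1', '2', '3', '4', '5', '6', '7', '8'] : List Char)) :
    pvMergedA d = PySem.Int.toStr ((PySem.Int.ofStr? (String.mk [d])).getD 0 + 1) := by
  fin_cases hd <;> decide

-- the run digit is not '9' when the run has length ≥ 2 (pvNo99)
theorem pv_not_nine (c : Char) (cs : List Char)
    (h9 : pvNo99 (c :: cs) = true)
    (hk : (cs.takeWhile (· == c)).length ≠ 0) : c ≠ '9' := by
  intro hc
  cases htw : cs.takeWhile (· == c) with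
  | nil => exact hk (by simp [htw])
  | cons b t =>
      have hbmem : b ∈ cs.takeWhile (· == c) := by
        rw [htw]; exact List.mem_cons_self
      have hb : b = c := by simpa using List.mem_takeWhile_imp hbmem
      have hcs : ∃ u, cs = b :: u := by
        cases cs with
        | nil => simp at htw
        | cons b' u =>
            rw [List.takeWhile_cons] at htw
            by_cases hb' : (b' == c) = true
            · simp [hb'] at htw; exact ⟨u, by rw [htw.1]⟩
            · simp [hb'] at htw
      obtain ⟨u, rfl⟩ := hcs
      subst hb; subst hc
      simp [pvNo99] at h9

theorem pv_pieceA_eq (c : Char) (k : Nat)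
    (hc : c ∈ pvDigits) (h0 : c ≠ '0') (h9 : 2 ≤ k → c ≠ '9') :
    pvPieceA c k = pvPiece c k := by
  by_cases hk : 2 ≤ k
  · have h9' := h9 hk
    have hc' : c ∈ (['1', '2', '3', '4', '5', '6', '7', '8'] : List Char) := by
      simp [pvDigits] at hc
      rcases hc with rfl | rfl | rfl | rfl | rfl | rfl | rfl | rfl | rfl | rfl <;>
        first | (exact absurd rfl h0) | (exact absurd rfl h9') | simp
    rw [pvPieceA, pvPiece, pv_mergedA_eq c hc']
  · have : k / 2 = 0 := by omega
    simp [pvPieceA, pvPiece, this]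

-- MAIN INVARIANT: starting from any state whose tracker cannot match the first char,
-- A's fold produces exactly B's run-grouped output appended to the accumulator.
theorem pv_main (n : Nat) (l : List Char) (acc : List String) (s : Option Char)
    (hn : l.length ≤ n)
    (hd : ∀ c ∈ l, c ∈ pvDigits ∧ c ≠ '0')
    (h9 : pvNo99 l = true)
    (hs : ∀ d, s = some d → l.head? ≠ some d) :
    (l.foldl pvAStep (acc, s)).1 = acc ++ pvBNums l := by
  induction n generalizing l acc s with
  | zero =>
      have : l = [] := List.eq_nil_of_length_eq_zero (by omega)
      subst this; simp [pvBNums, pvGroupRuns]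
  | succ n ih =>
      cases l with
      | nil => simp [pvBNums, pvGroupRuns]
      | cons c cs =>
          have hc := hd c (by simp)
          -- the incoming tracker is irrelevant for the first char
          have hstep : (c :: cs).foldl pvAStep (acc, s) =
              (c :: cs).foldl pvAStep (acc, none) := by
            cases s with
            | none => rfl
            | some d =>
                apply pv_state_irrel _ _ _ _ hc.2
                intro h
                have hdc : d = c := by simpa using h
                exact hs d rfl (by simp [hdc])
          rw [hstep]
          have hdec := pv_decomp c cs
          have hsub : (cs.dropWhile (· == c)).Sublist cs := List.dropWhile_sublist _
          have hrec := ih (cs.dropWhile (· == c))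
            (acc ++ pvPieceA c (1 + (cs.takeWhile (· == c)).length))
            (if (1 + (cs.takeWhile (· == c)).length) % 2 = 1 then some c else none)
            (by
              have h1 := hsub.length_le
              simp only [List.length_cons] at hn
              omega)
            (fun x hx => hd x (by simp [hsub.mem hx]))
            (pv_no99_dropWhile _ _ (pv_no99_tail c cs h9))
            (by
              intro d hdd hh
              split at hdd
              · cases hdd
                cases hh2 : (cs.dropWhile (· == c)).head? with
                | none => simp [hh2] at hh
                | some y =>
                    rw [hh2] at hh
                    have hy := pv_head_dropWhile _ _ _ hh2
                    simp at hy
                    exact hy (by simpa using hh)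
              · cases hdd)
          conv_lhs => rw [hdec]
          rw [List.foldl_append, pv_run _ c acc hc.2, hrec, pv_bNums_cons,
            pv_pieceA_eq c _ hc.1 hc.2
              (fun h2 => pv_not_nine c cs h9 (by omega))]
          simp

-- every entry of B's nums is one of "1".."9" (under the precondition)
theorem pv_piece_allowed (c : Char) (k : Nat)
    (hc : c ∈ pvDigits) (h0 : c ≠ '0') (h9 : 2 ≤ k → c ≠ '9') :
    ∀ x ∈ pvPiece c k,
      x ∈ (["1", "2", "3", "4", "5", "6", "7", "8", "9"] : List String) := by
  intro x hx
  rw [pvPiece] at hx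
  rcases List.mem_append.mp hx with h | h
  · have hx2 := List.eq_of_mem_replicate h
    have hk2 : 2 ≤ k := by
      by_contra hk2
      have : k / 2 = 0 := by omega
      simp [this] at h
    have hc' : c ∈ (['1', '2', '3', '4', '5', '6', '7', '8'] : List Char) := by
      simp [pvDigits] at hc
      rcases hc with rfl | rfl | rfl | rfl | rfl | rfl | rfl | rfl | rfl | rfl <;>
        first | (exact absurd rfl h0) | (exact absurd rfl (h9 hk2)) | simp
    subst hx2
    fin_cases hc' <;> decide
  · have hx2 := List.eq_of_mem_replicate h
    subst hx2
    simp [pvDigits] at hc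
    rcases hc with rfl | rfl | rfl | rfl | rfl | rfl | rfl | rfl | rfl | rfl <;>
      first | (exact absurd rfl h0) | decide

theorem pv_bNums_allowed (l : List Char)
    (hd : ∀ c ∈ l, c ∈ pvDigits ∧ c ≠ '0') (h9 : pvNo99 l = true) :
    ∀ x ∈ pvBNums l,
      x ∈ (["1", "2", "3", "4", "5", "6", "7", "8", "9"] : List String) := by
  induction l using pvGroupRuns.induct with
  | case1 => simp [pvBNums, pvGroupRuns]
  | case2 c cs ih =>
      intro x hx
      rw [pv_bNums_cons] at hx
      rcases List.mem_append.mp hx with h | h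
      · have hc := hd c (by simp)
        exact pv_piece_allowed c _ hc.1 hc.2
          (fun h2 => pv_not_nine c cs h9 (by omega)) x h
      · have hsub : (cs.dropWhile (· == c)).Sublist cs := List.dropWhile_sublist _
        exact ih (fun y hy => hd y (by simp [hsub.mem hy]))
          (pv_no99_dropWhile _ _ (pv_no99_tail c cs h9)) x h

theorem pv_int_eq (x : String)
    (hx : x ∈ (["1", "2", "3", "4", "5", "6", "7", "8", "9"] : List String)) :
    pyROrderDict.getD x 0 = (PySem.Int.ofStr? x).getD 0 := by
  fin_cases hx <;> decide

-- ===== VERDICT (by name: the statement is the Claim_ definition above) =====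
theorem squeeze_line_spec : Claim_equal_squeeze_line := by
  intro line N _ hpre
  obtain ⟨hdigb, h9⟩ := hpre
  have hdig : ∀ c ∈ line.toList, c ∈ pvDigits := by
    intro c hc
    have := (List.all_eq_true.mp hdigb) c hc
    simpa using this
  unfold Spec_squeeze_line squeeze_line squeeze_line_alt
  dsimp only
  set l := line.toList.filter (fun c => c ≠ '0') with hl
  have hd : ∀ c ∈ l, c ∈ pvDigits ∧ c ≠ '0' := by
    intro c hc
    rw [hl, List.mem_filter] at hc
    exact ⟨hdig c hc.1, by simpa using hc.2⟩
  have hnums : (line.toList.foldl pvAStep ([], none)).1 = pvBNums l := by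
    rw [pv_foldl_filter, ← hl]
    simpa using pv_main l.length l [] none le_rfl hd h9 (by simp)
  rw [hnums]
  have hmap : (pvBNums l).map (fun x => pyROrderDict.getD x 0) =
      (pvBNums l).map (fun x => (PySem.Int.ofStr? x).getD 0) :=
    List.map_congr_left (fun x hx => pv_int_eq x (pv_bNums_allowed l hd h9 x hx))
  by_cases hne : pvBNums l = []
  · simp [hne, PySem.List.max?]
  · simp [hne, hmap]
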